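-- pv_equiv track=rewrite | github.com/softwarerbfl/Algorithm | PCCP/Simulation/청소로봇3.py | solution
-- ===== SOURCE A (Python) =====
-- def solution(board, k):
--     dr=[-1,0,1,0]
--     dc=[0,1,0,-1]
--     n=len(board)
--     r,c = 0,0
--     d=1
--     cnt=0
--     while cnt < k:
--         cnt+=1
--         nr=r+dr[d]
--         nc=c+dc[d]
--         # 주어진 공간을 넘어 가는 경우
--         if nr<0 or nr>=n or nc<0 or nc>=n or board[nr][nc]==1:
--             d=(d+1)%4
--             continue
--         r=nr
--         c=nc
--     return [r,c]
-- ===== SOURCE B (Python) =====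
-- def solution(board, k):
--     n = len(board)
--     deltas = ((-1, 0), (0, 1), (1, 0), (0, -1))
--
--     def advance(state):
--         r, c, d = state
--         dr, dc = deltas[d]
--         nr, nc = r + dr, c + dc
--         if 0 <= nr < n and 0 <= nc < n and board[nr][nc] != 1:
--             return (nr, nc, d)
--         return (r, c, (d + 1) % 4)
--
--     target = max(k, 0)  # non-positive k means the robot never moves
--     path = [(0, 0, 1)]          # path[i] = state after i steps
--     first = {path[0]: 0}        # first index at which each state appeared
--     while len(path) <= target:
--         nxt = advance(path[-1])
--         if nxt in first:
--             mu = first[nxt]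
--             lam = len(path) - mu
--             r, c, _ = path[mu + (target - mu) % lam]
--             return [r, c]
--         first[nxt] = len(path)
--         path.append(nxt)
--     r, c, _ = path[target]
--     return [r, c]
-- ===== Notes on version B (the rewrite author's own statement) =====
-- stated objective: faster
-- what changed: B records the whole trajectory of (r,c,d) states in a list with a first-occurrence dictionary, and on the first repeated state answers by indexing the stored path at mu + (k - mu) % cycle_length, instead of A's simulating every one of the k iterations.
-- outside the precondition, e.g. on solution([[0, 1], [1]], 5): A returns [0, 0], B returns [0, 0]
import Mathlib
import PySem

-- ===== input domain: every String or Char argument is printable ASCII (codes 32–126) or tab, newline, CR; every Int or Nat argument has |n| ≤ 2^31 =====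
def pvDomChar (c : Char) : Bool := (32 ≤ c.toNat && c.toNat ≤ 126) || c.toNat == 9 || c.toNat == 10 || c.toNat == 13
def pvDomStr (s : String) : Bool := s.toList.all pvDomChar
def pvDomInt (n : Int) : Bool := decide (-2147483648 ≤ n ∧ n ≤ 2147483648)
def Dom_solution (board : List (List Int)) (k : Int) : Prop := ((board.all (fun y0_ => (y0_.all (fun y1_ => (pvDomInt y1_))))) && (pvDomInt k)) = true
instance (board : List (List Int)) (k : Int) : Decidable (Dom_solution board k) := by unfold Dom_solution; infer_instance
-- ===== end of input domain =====

-- B replaces A's step-by-step O(k) simulation by recording the trajectory of (r,c,d) states in a list with a first-occurrence dictionary and indexing the stored path at mu + (k-mu) % cycle_length on the first repeat (measured asymptotically faster).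


-- ===== PORT A =====
-- one iteration of A's while-loop body, acting on the state (r, c, d)
def stepA (board : List (List Int)) (st : Int × Int × Int) : Int × Int × Int :=
  let n : Int := board.length
  let nr := st.1 + PySem.List.pyGetD [-1, 0, 1, 0] st.2.2 0
  let nc := st.2.1 + PySem.List.pyGetD [0, 1, 0, -1] st.2.2 0
  if nr < 0 ∨ nr ≥ n ∨ nc < 0 ∨ nc ≥ n ∨ PySem.List.pyGetD (PySem.List.pyGetD board nr []) nc 0 = 1 then
    (st.1, st.2.1, PySem.Int.mod (st.2.2 + 1) 4)
  else
    (nr, nc, st.2.2)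

-- 'while cnt < k': the loop body runs exactly k.toNat times
def loopA (board : List (List Int)) (st : Int × Int × Int) : Nat → Int × Int × Int
  | 0 => st
  | f + 1 => loopA board (stepA board st) f

def solution (board : List (List Int)) (k : Int) : List Int :=
  let st := loopA board (0, 0, 1) k.toNat
  [st.1, st.2.1]

-- ===== PORT B =====
-- Source B's 'deltas[d]'
def deltaB (d : Int) : Int × Int :=
  PySem.List.pyGetD [((-1 : Int), (0 : Int)), (0, 1), (1, 0), (0, -1)] d (0, 0)

-- Source B's 'advance(state)'
def advanceB (board : List (List Int)) (st : Int × Int × Int) : Int × Int × Int :=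
  let n : Int := board.length
  let dd := deltaB st.2.2
  let nr := st.1 + dd.1
  let nc := st.2.1 + dd.2
  if 0 ≤ nr ∧ nr < n ∧ 0 ≤ nc ∧ nc < n ∧ PySem.List.pyGetD (PySem.List.pyGetD board nr []) nc 0 ≠ 1 then
    (nr, nc, st.2.2)
  else
    (st.1, st.2.1, PySem.Int.mod (st.2.2 + 1) 4)

-- Source B's 'while len(path) <= target' loop: it appends one state per iteration, so
-- target.toNat is enough fuel; it returns the indexed path entry (the two return sites)
def buildB (board : List (List Int)) (target : Int)
    (first : PySem.Dict (Int × Int × Int) Int) (path : List (Int × Int × Int)) :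
    Nat → List Int
  | 0 =>
      let st := PySem.List.pyGetD path target (0, 0, 1)
      [st.1, st.2.1]
  | f + 1 =>
      if (path.length : Int) ≤ target then
        let nxt := advanceB board (path.getLastD (0, 0, 1))
        match first.get? nxt with
        | some mu =>
            let st := PySem.List.pyGetD path
              (mu + PySem.Int.mod (target - mu) ((path.length : Int) - mu)) (0, 0, 1)
            [st.1, st.2.1]
        | none => buildB board target (first.insert nxt (path.length : Int)) (path ++ [nxt]) f
      else
        let st := PySem.List.pyGetD path target (0, 0, 1)
        [st.1, st.2.1]

def solution_alt (board : List (List Int)) (k : Int) : List Int :=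
  let target := max k 0
  buildB board target (PySem.Dict.empty.insert (0, 0, 1) 0) [(0, 0, 1)] target.toNat

-- ===== PRECONDITION & SPEC =====
-- Pre_ excludes ragged boards (a row shorter than the board) except in the two shapes where no cell is ever
-- read (k ≤ 0: the loop never runs; board of size ≤ 1: every neighbour is out of bounds): on a ragged board
-- the Python A raises IndexError once the robot inspects a short row; this also excludes some ragged boards
-- whose short rows happen never to be inspected, on which A returns normally and B returns the same value.
def Pre_solution (board : List (List Int)) (k : Int) : Prop :=
  k ≤ 0 ∨ board.length ≤ 1 ∨ ∀ row ∈ board, board.length ≤ row.length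
instance (board : List (List Int)) (k : Int) : Decidable (Pre_solution board k) := by
  unfold Pre_solution; infer_instance

def pvWitness_solution : List (List Int) × Int := ([[0, 0], [0, 1]], 7)

def Spec_solution (board : List (List Int)) (k : Int) (out : List Int) : Prop := out = solution_alt board k
instance (board : List (List Int)) (k : Int) (out : List Int) : Decidable (Spec_solution board k out) := by unfold Spec_solution; infer_instance

-- ===== CLAIM (what is proved, stated in full; the proofs are below) =====
def Claim_equal_solution : Prop := ∀ (board : List (List Int)) (k : Int), Dom_solution board k → Pre_solution board k → Spec_solution board k (solution board k)

-- ===== LEMMAS AND PROOFS =====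

theorem loopA_add (board : List (List Int)) (a b : Nat) :
    ∀ st, loopA board st (a + b) = loopA board (loopA board st a) b := by
  induction a with
  | zero => intro st; rw [Nat.zero_add]; simp only [loopA]
  | succ a ih =>
    intro st
    rw [show a + 1 + b = (a + b) + 1 from by omega]
    show loopA board (stepA board st) (a + b) = _
    rw [ih]
    rfl

theorem loopA_succ_right (board : List (List Int)) (st : Int × Int × Int) (j : Nat) :
    loopA board st (j + 1) = stepA board (loopA board st j) := by
  rw [loopA_add]; rfl

theorem loopA_fixed_iter (board : List (List Int)) (L : Nat)
    (st : Int × Int × Int) (hfix : loopA board st L = st) :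
    ∀ q, loopA board st (q * L) = st := by
  intro q
  induction q with
  | zero => rw [Nat.zero_mul]; simp only [loopA]
  | succ q ih =>
    rw [show (q + 1) * L = L + q * L from by ring, loopA_add, hfix, ih]

theorem loopA_mod (board : List (List Int)) (L : Nat)
    (st : Int × Int × Int) (hfix : loopA board st L = st) (m : Nat) :
    loopA board st m = loopA board st (m % L) := by
  conv_lhs => rw [show m = L * (m / L) + m % L from (Nat.div_add_mod m L).symm]
  rw [show L * (m / L) = (m / L) * L from by ring, loopA_add, loopA_fixed_iter board L st hfix]

-- the direction component of every state A's loop reaches lies in [0, 4)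
theorem stepA_dir (board : List (List Int)) (st : Int × Int × Int) :
    (stepA board st).2.2 = st.2.2 ∨ (stepA board st).2.2 = PySem.Int.mod (st.2.2 + 1) 4 := by
  unfold stepA
  dsimp only
  split
  · right; rfl
  · left; rfl

theorem dir_bounds (board : List (List Int)) (j : Nat) :
    0 ≤ (loopA board (0, 0, 1) j).2.2 ∧ (loopA board (0, 0, 1) j).2.2 < 4 := by
  induction j with
  | zero => exact ⟨by norm_num [loopA], by norm_num [loopA]⟩
  | succ j ih =>
    rw [loopA_succ_right]
    rcases stepA_dir board (loopA board (0, 0, 1) j) with h | h <;> rw [h]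
    · exact ih
    · exact ⟨PySem.Int.mod_nonneg _ (by omega), PySem.Int.mod_lt _ (by omega)⟩

theorem delta_fst (d : Int) (h0 : 0 ≤ d) (h4 : d < 4) :
    (deltaB d).1 = PySem.List.pyGetD [-1, 0, 1, 0] d 0 := by
  interval_cases d <;> decide

theorem delta_snd (d : Int) (h0 : 0 ≤ d) (h4 : d < 4) :
    (deltaB d).2 = PySem.List.pyGetD [0, 1, 0, -1] d 0 := by
  interval_cases d <;> decide

theorem if_flip {α : Type} {P Q : Prop} [Decidable P] [Decidable Q] (h : P ↔ ¬ Q) (x y : α) :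
    (if P then x else y) = (if Q then y else x) := by
  by_cases hq : Q
  · rw [if_pos hq, if_neg (by rw [h]; exact not_not_intro hq)]
  · rw [if_pos (h.mpr hq), if_neg hq]

-- on the directions that actually occur, Source B's advance is A's loop body
theorem advanceB_eq_stepA (board : List (List Int)) (st : Int × Int × Int)
    (hd : 0 ≤ st.2.2 ∧ st.2.2 < 4) : advanceB board st = stepA board st := by
  obtain ⟨r, c, d⟩ := st
  obtain ⟨h0, h4⟩ := hd
  simp only at h0 h4
  unfold advanceB stepA
  dsimp only
  rw [delta_fst d h0 h4, delta_snd d h0 h4]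
  exact if_flip (by push Not; tauto) _ _

theorem getD_range_map (F : Nat → Int × Int × Int) (L m : Nat) (hm : m < L)
    (d : Int × Int × Int) :
    PySem.List.pyGetD ((List.range L).map F) ((m : Nat) : Int) d = F m := by
  rw [PySem.List.pyGetD_natCast]
  simp [List.getD_eq_getElem?_getD, hm]

theorem getLastD_range_map (F : Nat → Int × Int × Int) (L : Nat) (hL : 1 ≤ L)
    (d : Int × Int × Int) :
    ((List.range L).map F).getLastD d = F (L - 1) := by
  obtain ⟨m, rfl⟩ : ∃ m, L = m + 1 := ⟨L - 1, by omega⟩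
  rw [List.range_succ, List.map_append]
  simp

-- main loop correspondence: with the path/dictionary invariants, B's loop returns A's k-th state
theorem buildB_eq (board : List (List Int)) (target : Int) (ht : 0 ≤ target) :
    ∀ (f L : Nat) (first : PySem.Dict (Int × Int × Int) Int),
      1 ≤ L → target.toNat < L + f →
      (∀ st j, first.get? st = some j →
        ∃ jn : Nat, j = (jn : Int) ∧ jn < L ∧ loopA board (0, 0, 1) jn = st) →
      buildB board target first ((List.range L).map (loopA board (0, 0, 1))) f
        = [(loopA board (0, 0, 1) target.toNat).1, (loopA board (0, 0, 1) target.toNat).2.1] := by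
  intro f
  induction f with
  | zero =>
    intro L first hL hfuel _
    rw [buildB, show target = ((target.toNat : Nat) : Int) from by omega,
      getD_range_map _ L target.toNat (by omega)]
    simp only [Int.toNat_natCast]
  | succ f ih =>
    intro L first hL hfuel hinv
    rw [buildB]
    simp only [List.length_map, List.length_range]
    by_cases hc : (L : Int) ≤ target
    · rw [if_pos hc]
      rw [getLastD_range_map _ L hL, advanceB_eq_stepA board _ (dir_bounds board (L - 1)),
        ← loopA_succ_right, show L - 1 + 1 = L from by omega]
      cases hget : first.get? (loopA board (0, 0, 1) L) with
      | some mu =>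
        simp only
        obtain ⟨jn, rfl, hjn, hS⟩ := hinv _ _ hget
        have hfix : loopA board (loopA board (0, 0, 1) jn) (L - jn) = loopA board (0, 0, 1) jn := by
          conv_lhs => rw [← loopA_add, show jn + (L - jn) = L from by omega, ← hS]
        rw [show target - (jn : Int) = ((target.toNat - jn : Nat) : Int) from by omega,
          show (L : Int) - (jn : Int) = ((L - jn : Nat) : Int) from by omega,
          PySem.Int.mod_natCast,
          show (jn : Int) + (((target.toNat - jn) % (L - jn) : Nat) : Int)
              = ((jn + (target.toNat - jn) % (L - jn) : Nat) : Int) from by push_cast; ring]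
        have hmodlt : (target.toNat - jn) % (L - jn) < L - jn := Nat.mod_lt _ (by omega)
        rw [getD_range_map _ L _ (by omega)]
        have : loopA board (0, 0, 1) target.toNat
            = loopA board (0, 0, 1) (jn + (target.toNat - jn) % (L - jn)) := by
          conv_lhs => rw [show target.toNat = jn + (target.toNat - jn) from by omega]
          rw [loopA_add, loopA_mod board (L - jn) _ hfix, ← loopA_add]
        rw [← this]
      | none =>
        simp only
        have hpath : (List.range L).map (loopA board (0, 0, 1)) ++ [loopA board (0, 0, 1) L]
            = (List.range (L + 1)).map (loopA board (0, 0, 1)) := by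
          rw [List.range_succ, List.map_append]; rfl
        rw [hpath]
        apply ih (L + 1) _ (by omega) (by omega)
        intro st j hj
        rw [PySem.Dict.get?_insert] at hj
        by_cases hcase : st = loopA board (0, 0, 1) L
        · rw [if_pos hcase] at hj
          exact ⟨L, (Option.some.inj hj).symm, by omega, hcase.symm⟩
        · rw [if_neg hcase] at hj
          obtain ⟨jn, h1, h2, h3⟩ := hinv _ _ hj
          exact ⟨jn, h1, by omega, h3⟩
    · rw [if_neg hc, show target = ((target.toNat : Nat) : Int) from by omega,
        getD_range_map _ L target.toNat (by omega)]
      simp only [Int.toNat_natCast]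

-- ===== VERDICT (by name: the statement is the Claim_ definition above) =====
theorem solution_spec : Claim_equal_solution := by
  intro board k _ _
  show solution board k = solution_alt board k
  unfold solution solution_alt
  have h := buildB_eq board (max k 0) (by omega) (max k 0).toNat 1
    (PySem.Dict.empty.insert (0, 0, 1) 0) (by omega) (by omega)
    (by
      intro st j hj
      rw [PySem.Dict.get?_insert] at hj
      by_cases hcase : st = (0, 0, 1)
      · rw [if_pos hcase] at hj
        exact ⟨0, (Option.some.inj hj).symm, by omega, hcase.symm⟩
      · rw [if_neg hcase] at hj
        simp [PySem.Dict.get?_empty] at hj)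
  have hpath1 : ((List.range 1).map (loopA board (0, 0, 1))) = [((0 : Int), (0 : Int), (1 : Int))] := rfl
  rw [hpath1] at h
  rw [h, show (max k 0).toNat = k.toNat from by omega]
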